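-- pv_equiv track=rewrite | github.com/shrutichaudhari4/Coderbyte | 5_Sum_of_elements_in_Array.py | ArrayAdditionI
-- ===== SOURCE A (Python) =====
-- def ArrayAdditionI(arr):
--     a=max(arr)
--     sum=0
--     for i in arr:
--         if i!=a:
--             sum+=i
--     if sum!=a:
--         return False
--     else:
--         return True
-- ===== SOURCE B (Python) =====
-- def ArrayAdditionI(arr):
--     m = max(arr)
--     return sum(arr) == m * (arr.count(m) + 1)
-- ===== Notes on version B (the rewrite author's own statement) =====
-- stated objective: simpler
-- what changed: Replaces A's explicit filtered-accumulation loop with a closed-form aggregate: sum(arr) == max * (count(max) + 1).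
import Mathlib
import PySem

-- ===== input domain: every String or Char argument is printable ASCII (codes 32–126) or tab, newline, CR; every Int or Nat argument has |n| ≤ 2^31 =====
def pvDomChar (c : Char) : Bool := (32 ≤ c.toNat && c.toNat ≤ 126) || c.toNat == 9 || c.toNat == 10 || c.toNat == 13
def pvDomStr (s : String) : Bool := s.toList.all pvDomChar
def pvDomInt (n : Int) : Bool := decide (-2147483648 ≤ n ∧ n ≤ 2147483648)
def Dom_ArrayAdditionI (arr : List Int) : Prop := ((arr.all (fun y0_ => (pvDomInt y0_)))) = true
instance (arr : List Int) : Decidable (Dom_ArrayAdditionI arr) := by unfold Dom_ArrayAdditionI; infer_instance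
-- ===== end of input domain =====

-- B replaces A's filtered accumulation loop by the closed form sum(arr) == max*(count(max)+1) (simpler decomposition, same cost).


-- ===== PORT A =====
-- a = max(arr); sum = 0; for i in arr: if i != a: sum += i; return not (sum != a)
def ArrayAdditionI (arr : List Int) : Bool :=
  match PySem.List.max? arr (fun y => y) with
  | none => false   -- unreachable under Pre_: Python's max raises ValueError on []
  | some a =>
    let s := arr.foldl (fun s i => if i ≠ a then s + i else s) 0
    if s ≠ a then false else true

-- ===== PORT B =====
-- m = max(arr); return sum(arr) == m * (arr.count(m) + 1)
def ArrayAdditionI_alt (arr : List Int) : Bool :=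
  match PySem.List.max? arr (fun y => y) with
  | none => false   -- unreachable under Pre_: max raises ValueError on []
  | some m => decide (arr.sum = m * ((PySem.List.count arr m : Int) + 1))

-- ===== PRECONDITION & SPEC =====
-- Pre_ excludes only the empty list, on which Python's max raises ValueError in both A and B.
def Pre_ArrayAdditionI (arr : List Int) : Prop := arr ≠ []
instance (arr : List Int) : Decidable (Pre_ArrayAdditionI arr) := by unfold Pre_ArrayAdditionI; infer_instance
def pvWitness_ArrayAdditionI : List Int := [1, 2, 3, 6]

def Spec_ArrayAdditionI (arr : List Int) (out : Bool) : Prop := out = ArrayAdditionI_alt arr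
instance (arr : List Int) (out : Bool) : Decidable (Spec_ArrayAdditionI arr out) := by unfold Spec_ArrayAdditionI; infer_instance

-- ===== CLAIM (what is proved, stated in full; the proofs are below) =====
def Claim_equal_ArrayAdditionI : Prop := ∀ (arr : List Int), Dom_ArrayAdditionI arr → Pre_ArrayAdditionI arr → Spec_ArrayAdditionI arr (ArrayAdditionI arr)

-- ===== LEMMAS AND PROOFS =====

-- A's filtered accumulation equals total sum minus all copies of a.
lemma foldl_filter_sum (a : Int) : ∀ (arr : List Int) (s : Int),
    arr.foldl (fun s i => if i ≠ a then s + i else s) s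
      = s + arr.sum - a * (arr.count a : Int) := by
  intro arr
  induction arr with
  | nil => intro s; simp
  | cons h t ih =>
    intro s
    by_cases hha : h = a
    · subst hha
      rw [List.foldl_cons, if_neg (fun hc => hc rfl), List.sum_cons, List.count_cons_self, ih]
      push_cast
      ring
    · simp only [List.foldl_cons, if_pos hha, List.sum_cons,
        List.count_cons_of_ne hha, ih]
      ring

-- ===== VERDICT (by name: the statement is the Claim_ definition above) =====
theorem ArrayAdditionI_spec : Claim_equal_ArrayAdditionI := by
  intro arr _ hpre
  unfold Spec_ArrayAdditionI ArrayAdditionI ArrayAdditionI_alt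
  cases hmax : PySem.List.max? arr (fun y => y) with
  | none => rfl
  | some a =>
    simp only [foldl_filter_sum, PySem.List.count_eq]
    have hexp : a * ((arr.count a : Int) + 1) = a * (arr.count a : Int) + a := by ring
    have : (0 + arr.sum - a * (arr.count a : Int) ≠ a)
        ↔ ¬ (arr.sum = a * ((arr.count a : Int) + 1)) := by
      constructor <;> intro h hc <;> apply h <;> omega
    split_ifs with h
    · simp [this.mp h]
    · have := this.not.mp h
      simp at this
      simp [this]
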